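-- pv_equiv track=rewrite | github.com/auryn31/aoc_2024 | day_09/index.py | move_numbers
-- ===== SOURCE A (Python) =====
-- from typing import List
--
-- def move_numbers(parts: List[str]) -> List[str]:
--     left_pointer = 0
--     right_pointer = len(parts) - 1
--
--     while left_pointer < right_pointer:
--         left_pointer = get_left_pointer(parts, left_pointer)
--         right_pointer = get_right_pointer(parts, right_pointer)
--
--         if left_pointer >= right_pointer:
--             break
--
--         # Swap numbers
--         parts[left_pointer], parts[right_pointer] = parts[right_pointer], parts[left_pointer]
--
--         # Move inward
--         left_pointer += 1
--         right_pointer -= 1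
--
--     return parts
--
-- def get_left_pointer(parts: List[str], left_pointer: int) -> int:
--     while left_pointer < len(parts) and parts[left_pointer] != ".":
--         left_pointer += 1
--     return left_pointer
--
-- def get_right_pointer(parts: List[str], right_pointer: int) -> int:
--     while right_pointer >= 0 and parts[right_pointer] == ".":
--         right_pointer -= 1
--     return right_pointer
-- ===== SOURCE B (Python) =====
-- from typing import List
--
-- def move_numbers(parts: List[str]) -> List[str]:
--     n = len(parts)
--     k = sum(1 for p in parts if p != ".")
--     fillers = [p for p in reversed(parts[k:]) if p != "."]
--     for i in range(k):
--         if parts[i] == ".":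
--             parts[i] = fillers.pop(0)
--     for i in range(k, n):
--         parts[i] = "."
--     return parts
-- ===== Notes on version B (the rewrite author's own statement) =====
-- stated objective: simpler
-- what changed: A compacts with two pointers that repeatedly scan for the next dot / last non-dot and swap in place; B instead counts the non-dots (k), collects the fillers from parts[k:] right-to-left in one pass, then overwrites the first k slots and dots out the tail.
import Mathlib
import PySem

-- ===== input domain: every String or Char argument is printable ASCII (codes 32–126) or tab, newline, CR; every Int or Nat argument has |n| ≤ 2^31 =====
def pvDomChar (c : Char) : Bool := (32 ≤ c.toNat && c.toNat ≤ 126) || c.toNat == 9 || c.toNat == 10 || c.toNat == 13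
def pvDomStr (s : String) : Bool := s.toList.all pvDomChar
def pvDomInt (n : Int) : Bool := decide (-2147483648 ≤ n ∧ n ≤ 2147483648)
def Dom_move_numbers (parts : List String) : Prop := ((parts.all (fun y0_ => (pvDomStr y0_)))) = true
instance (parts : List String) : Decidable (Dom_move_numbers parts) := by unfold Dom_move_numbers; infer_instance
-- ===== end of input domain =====

-- B replaces A's two-pointer in-place swapping by three plain passes (count the non-dots,
-- collect the fillers right-to-left, overwrite); objective: simpler. Both Pythons mutate
-- `parts` in place the same way; the equivalence proved here is about the return value.

-- ===== PORT A =====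
-- while left_pointer < len(parts) and parts[left_pointer] != ".": left_pointer += 1
-- (indexing is guarded by the bound check; pyGetD "" is exact on every index A reaches)
def get_left_pointer (parts : List String) (l : Int) : Int :=
  if h : l < (parts.length : Int) ∧ PySem.List.pyGetD parts l "" ≠ "." then
    get_left_pointer parts (l + 1)
  else l
termination_by ((parts.length : Int) - l).toNat
decreasing_by have := h.1; omega

-- while right_pointer >= 0 and parts[right_pointer] == ".": right_pointer -= 1
def get_right_pointer (parts : List String) (r : Int) : Int :=
  if h : 0 ≤ r ∧ PySem.List.pyGetD parts r "" = "." then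
    get_right_pointer parts (r - 1)
  else r
termination_by (r + 1).toNat
decreasing_by have := h.1; omega

-- termination facts the loop below needs: the helpers move their pointers inward
theorem glp_ge (parts : List String) (l : Int) : l ≤ get_left_pointer parts l := by
  fun_induction get_left_pointer parts l with
  | case1 l h ih => omega
  | case2 l h => omega

theorem grp_le (parts : List String) (r : Int) : get_right_pointer parts r ≤ r := by
  fun_induction get_right_pointer parts r with
  | case1 r h ih => omega
  | case2 r h => omega

-- the while-loop of move_numbers; the tuple swap reads both cells, then writes both
def move_numbers_loop (parts : List String) (l r : Int) : List String :=
  if l < r then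
    if get_left_pointer parts l ≥ get_right_pointer parts r then parts
    else
      move_numbers_loop
        ((PySem.List.pySetD
            (PySem.List.pySetD parts (get_left_pointer parts l)
              (PySem.List.pyGetD parts (get_right_pointer parts r) ""))
            (get_right_pointer parts r)
            (PySem.List.pyGetD parts (get_left_pointer parts l) "")))
        (get_left_pointer parts l + 1) (get_right_pointer parts r - 1)
  else parts
termination_by (r - l).toNat
decreasing_by
  have h1 := glp_ge parts l
  have h2 := grp_le parts r
  omega

def move_numbers (parts : List String) : List String :=
  move_numbers_loop parts 0 ((parts.length : Int) - 1)

-- ===== PORT B =====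
-- the two index loops of Source B walk the list once: positions below k keep non-dots and
-- fill dots from `fillers` (head = fillers.pop(0)); positions from k on become "."
def fill_prefix : List String → List String → Nat → List String
  | xs, _, 0 => xs.map (fun _ => ".")
  | [], _, _+1 => []
  | x :: rest, fillers, k+1 =>
    if x = "." then
      match fillers with
      | f :: fs => f :: fill_prefix rest fs k
      | [] => x :: fill_prefix rest [] k  -- fillers.pop(0) would raise; unreachable (k counts the non-dots)
    else x :: fill_prefix rest fillers k

def move_numbers_alt (parts : List String) : List String :=
  let k := (parts.filter (fun p => decide (p ≠ "."))).length
  let fillers := ((parts.drop k).reverse).filter (fun p => decide (p ≠ "."))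
  fill_prefix parts fillers k

-- ===== PRECONDITION & SPEC =====
def Spec_move_numbers (parts : List String) (out : List String) : Prop := out = move_numbers_alt parts
instance (parts : List String) (out : List String) : Decidable (Spec_move_numbers parts out) := by unfold Spec_move_numbers; infer_instance

-- ===== CLAIM (what is proved, stated in full; the proofs are below) =====
def Claim_equal_move_numbers : Prop := ∀ (parts : List String), Dom_move_numbers parts → Spec_move_numbers parts (move_numbers parts)

-- ===== LEMMAS AND PROOFS =====

-- evaluation of get_left_pointer
theorem glp_skip (C : List String) (hC : ∀ x ∈ C, x ≠ ".") :
    ∀ (P R : List String),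
    get_left_pointer (P ++ C ++ R) (P.length : Int)
      = get_left_pointer (P ++ C ++ R) ((P.length : Int) + C.length) := by
  induction C with
  | nil => simp
  | cons c C ih =>
    intro P R
    have hc : c ≠ "." := hC c (by simp)
    have hget : PySem.List.pyGetD (P ++ c :: C ++ R) (P.length : Int) "" = c := by
      rw [PySem.List.pyGetD_natCast]; simp
    rw [get_left_pointer]
    rw [dif_pos ⟨by simp; omega, by rw [hget]; exact hc⟩]
    have h2 := ih (fun x hx => hC x (by simp [hx])) (P ++ [c]) R
    simp only [List.append_assoc, List.singleton_append, List.length_append, List.length_singleton] at h2 ⊢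
    rw [show ((P.length : Int) + 1 = ((P.length + 1 : Nat) : Int)) by push_cast; ring] at *
    rw [h2]
    congr 1
    simp only [List.length_cons]; push_cast; omega

theorem glp_stop_dot (X R : List String) :
    get_left_pointer (X ++ "." :: R) (X.length : Int) = (X.length : Int) := by
  rw [get_left_pointer, dif_neg]
  rintro ⟨-, h2⟩
  apply h2
  rw [PySem.List.pyGetD_natCast]; simp

theorem glp_at_allD (X S : List String) (hS : ∀ x ∈ S, x = ".") :
    get_left_pointer (X ++ S) (X.length : Int) = (X.length : Int) := by
  cases S with
  | nil => rw [get_left_pointer, dif_neg (by simp)]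
  | cons s S =>
    have hs : s = "." := hS s (by simp)
    subst hs
    exact glp_stop_dot X S

-- evaluation of get_right_pointer
theorem grp_skip : ∀ (D : List String), (∀ x ∈ D, x = ".") → ∀ (X R : List String),
    get_right_pointer (X ++ D ++ R) ((X.length : Int) + D.length - 1)
      = get_right_pointer (X ++ D ++ R) ((X.length : Int) - 1) := by
  intro D
  induction D using List.reverseRecOn with
  | nil => simp
  | append_singleton D d ih =>
    intro hD X R
    have hd : d = "." := hD d (by simp)
    have hD' : ∀ x ∈ D, x = "." := fun x hx => hD x (by simp [hx])
    have hidx : ((X.length : Int) + (D ++ [d]).length - 1) = ((X.length + D.length : Nat) : Int) := by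
      simp only [List.length_append, List.length_cons, List.length_nil]; push_cast; ring
    rw [hidx, get_right_pointer, dif_pos]
    · have h2 := ih hD' X (d :: R)
      have hl : X ++ (D ++ [d]) ++ R = X ++ D ++ (d :: R) := by simp
      rw [hl]
      have : ((X.length + D.length : Nat) : Int) - 1 = (X.length : Int) + D.length - 1 := by push_cast; ring
      rw [this, h2]
    · constructor
      · positivity
      · rw [PySem.List.pyGetD_natCast]
        have : X ++ (D ++ [d]) ++ R = (X ++ D) ++ d :: R := by simp
        rw [this]
        have : X.length + D.length = (X ++ D).length := by simp
        rw [this]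
        simp [hd]

theorem grp_stop (X R : List String) (b : String) (hb : b ≠ ".") :
    get_right_pointer (X ++ b :: R) (X.length : Int) = (X.length : Int) := by
  rw [get_right_pointer, dif_neg]
  rintro ⟨-, h2⟩
  apply hb
  rw [PySem.List.pyGetD_natCast] at h2
  simpa using h2

theorem grp_nd_end (C R : List String) (hC : ∀ x ∈ C, x ≠ ".") :
    get_right_pointer (C ++ R) ((C.length : Int) - 1) = (C.length : Int) - 1 := by
  induction C using List.reverseRecOn with
  | nil => rw [get_right_pointer, dif_neg (by simp)]
  | append_singleton C b _ =>
    have hb : b ≠ "." := hC b (by simp)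
    have hidx : (((C ++ [b]).length : Int) - 1) = ((C.length : Nat) : Int) := by simp
    rw [hidx]
    have := grp_stop C (R) b hb
    simpa using this

-- the loop returns parts as soon as the pointers have crossed
theorem loop_ret (parts : List String) (l r : Int)
    (h : get_left_pointer parts l ≥ get_right_pointer parts r) :
    move_numbers_loop parts l r = parts := by
  rw [move_numbers_loop]
  split_ifs <;> rfl

-- the tuple swap, evaluated on the decomposed list
theorem swap_eval (C M S : List String) (b : String) :
    (PySem.List.pySetD
      (PySem.List.pySetD (C ++ "." :: (M ++ b :: S)) (C.length : Int)
        (PySem.List.pyGetD (C ++ "." :: (M ++ b :: S)) ((C.length : Int) + 1 + M.length) ""))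
      ((C.length : Int) + 1 + M.length)
      (PySem.List.pyGetD (C ++ "." :: (M ++ b :: S)) (C.length : Int) ""))
    = C ++ b :: (M ++ "." :: S) := by
  have hidx : ((C.length : Int) + 1 + M.length) = ((C.length + 1 + M.length : Nat) : Int) := by
    push_cast; ring
  have hshape : C ++ "." :: (M ++ b :: S) = (C ++ "." :: M) ++ b :: S := by simp
  have hlen : C.length + 1 + M.length = (C ++ "." :: M).length := by simp; omega
  have hvr : PySem.List.pyGetD (C ++ "." :: (M ++ b :: S)) ((C.length : Int) + 1 + M.length) "" = b := by
    rw [hidx, PySem.List.pyGetD_natCast, hshape, hlen]; simp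
  have hvl : PySem.List.pyGetD (C ++ "." :: (M ++ b :: S)) (C.length : Int) "" = "." := by
    rw [PySem.List.pyGetD_natCast]; simp
  rw [hvr, hvl, PySem.List.pySetD_natCast, hidx, PySem.List.pySetD_natCast]
  have h1 : (C ++ "." :: (M ++ b :: S)).set C.length b = C ++ b :: (M ++ b :: S) := by simp
  rw [h1]
  have hshape2 : C ++ b :: (M ++ b :: S) = (C ++ b :: M) ++ b :: S := by simp
  have hlen2 : C.length + 1 + M.length = (C ++ b :: M).length := by simp; omega
  rw [hshape2, hlen2]
  simp

-- facts about fill_prefix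
theorem fill_zero (xs f : List String) : fill_prefix xs f 0 = xs.map (fun _ => ".") := by
  cases xs <;> rfl

theorem fill_step_dot (rest gs : List String) (g : String) (k : Nat) :
    fill_prefix ("." :: rest) (g :: gs) (k+1) = g :: fill_prefix rest gs k := rfl

theorem fill_step_dot_nil (rest : List String) (k : Nat) :
    fill_prefix ("." :: rest) [] (k+1) = "." :: fill_prefix rest [] k := rfl

theorem fill_step_nd (x : String) (rest f : List String) (k : Nat) (hx : x ≠ ".") :
    fill_prefix (x :: rest) f (k+1) = x :: fill_prefix rest f k := by
  rw [fill_prefix.eq_def]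
  simp only [if_neg hx]

theorem map_dot_self (S : List String) (hS : ∀ x ∈ S, x = ".") :
    S.map (fun _ => ".") = S := by
  induction S with
  | nil => rfl
  | cons x S ih => simp_all

theorem fill_skip (C : List String) (hC : ∀ x ∈ C, x ≠ ".") :
    ∀ (R f : List String) (m : Nat),
    fill_prefix (C ++ R) f (C.length + m) = C ++ fill_prefix R f m := by
  induction C with
  | nil => simp
  | cons c C ih =>
    intro R f m
    have hc : c ≠ "." := hC c (by simp)
    have h1 : (c :: C).length + m = (C.length + m) + 1 := by simp; omega
    rw [h1, List.cons_append, fill_step_nd c _ _ _ hc, ih (fun x hx => hC x (by simp [hx]))]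
    rfl

theorem fill_congr : ∀ (k : Nat) (xs ys f : List String),
    xs.length = ys.length → xs.take k = ys.take k →
    fill_prefix xs f k = fill_prefix ys f k := by
  intro k
  induction k with
  | zero =>
    intro xs ys f h _
    rw [fill_zero, fill_zero, List.map_const', List.map_const', h]
  | succ k ih =>
    intro xs ys f h htake
    cases xs with
    | nil => cases ys with
      | nil => rfl
      | cons y ys => simp at h
    | cons x xs => cases ys with
      | nil => simp at h
      | cons y ys =>
        simp only [List.take_succ_cons, List.cons.injEq] at htake
        obtain ⟨rfl, htk⟩ := htake
        simp only [List.length_cons, Nat.add_right_cancel_iff] at h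
        by_cases hx : x = "."
        · subst hx
          cases f with
          | nil => rw [fill_step_dot_nil, fill_step_dot_nil]
                   exact congrArg _ (ih _ _ _ h htk)
          | cons g gs => rw [fill_step_dot, fill_step_dot]
                         exact congrArg _ (ih _ _ _ h htk)
        · rw [fill_step_nd _ _ _ _ hx, fill_step_nd _ _ _ _ hx]
          exact congrArg _ (ih _ _ _ h htk)

-- B's result on an already compacted list
theorem alt_sorted (C S : List String) (hC : ∀ x ∈ C, x ≠ ".") (hS : ∀ x ∈ S, x = ".") :
    move_numbers_alt (C ++ S) = C ++ S := by
  have hfC : C.filter (fun p => decide (p ≠ ".")) = C := by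
    rw [List.filter_eq_self]; intro a ha; simpa using hC a ha
  have hfS : S.filter (fun p => decide (p ≠ ".")) = [] := by
    rw [List.filter_eq_nil_iff]; intro a ha; simpa using hS a ha
  have hk : ((C ++ S).filter (fun p => decide (p ≠ "."))).length = C.length := by
    rw [List.filter_append, hfC, hfS]; simp
  unfold move_numbers_alt
  simp only [hk]
  have hdrop : (C ++ S).drop C.length = S := by simp
  rw [hdrop]
  have hfR : S.reverse.filter (fun p => decide (p ≠ ".")) = [] := by
    rw [List.filter_eq_nil_iff]; intro a ha; simp only [List.mem_reverse] at ha; simpa using hS a ha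
  rw [hfR]
  have := fill_skip C hC S [] 0
  simp only [Nat.add_zero] at this
  rw [this, fill_zero, map_dot_self S hS]

-- B's result is invariant under one swap of A
theorem alt_swap (C M S : List String) (b : String)
    (hC : ∀ x ∈ C, x ≠ ".") (hS : ∀ x ∈ S, x = ".") (hb : b ≠ ".") :
    move_numbers_alt (C ++ b :: (M ++ "." :: S)) = move_numbers_alt (C ++ "." :: (M ++ b :: S)) := by
  have hfC : C.filter (fun p => decide (p ≠ ".")) = C := by
    rw [List.filter_eq_self]; intro a ha; simpa using hC a ha
  have hfS : S.filter (fun p => decide (p ≠ ".")) = [] := by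
    rw [List.filter_eq_nil_iff]; intro a ha; simpa using hS a ha
  obtain ⟨c, hc_def⟩ : ∃ c, c = (M.filter (fun p => decide (p ≠ "."))).length := ⟨_, rfl⟩
  have hc : c ≤ M.length := hc_def ▸ List.length_filter_le _ _
  have hk1 : ((C ++ b :: (M ++ "." :: S)).filter (fun p => decide (p ≠ "."))).length
      = C.length + (c + 1) := by
    rw [List.filter_append, List.filter_cons_of_pos (p := fun p => decide (p ≠ ".")) (by simp [hb]), List.filter_append,
      List.filter_cons_of_neg (p := fun p => decide (p ≠ ".")) (by simp), hfC, hfS]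
    simp only [List.length_append, List.length_cons, List.length_nil]
    omega
  have hk2 : ((C ++ "." :: (M ++ b :: S)).filter (fun p => decide (p ≠ "."))).length
      = C.length + (c + 1) := by
    rw [List.filter_append, List.filter_cons_of_neg (p := fun p => decide (p ≠ ".")) (by simp), List.filter_append,
      List.filter_cons_of_pos (p := fun p => decide (p ≠ ".")) (by simp [hb]), hfC, hfS]
    simp only [List.length_append, List.length_cons, List.length_nil]
    omega
  have hdrop1 : (C ++ b :: (M ++ "." :: S)).drop (C.length + (c + 1))
      = M.drop c ++ "." :: S := by
    have h1 : C ++ b :: (M ++ "." :: S) = (C ++ [b]) ++ (M ++ "." :: S) := by simp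
    rw [h1, List.drop_append, List.drop_eq_nil_of_le (by simp only [List.length_append, List.length_cons, List.length_nil]; omega),
      show C.length + (c + 1) - (C ++ [b]).length = c by simp only [List.length_append, List.length_cons, List.length_nil]; omega,
      List.drop_append_of_le_length hc]
    simp
  have hdrop2 : (C ++ "." :: (M ++ b :: S)).drop (C.length + (c + 1))
      = M.drop c ++ b :: S := by
    have h1 : C ++ "." :: (M ++ b :: S) = (C ++ ["."]) ++ (M ++ b :: S) := by simp
    rw [h1, List.drop_append, List.drop_eq_nil_of_le (by simp only [List.length_append, List.length_cons, List.length_nil]; omega),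
      show C.length + (c + 1) - (C ++ ["."]).length = c by simp only [List.length_append, List.length_cons, List.length_nil]; omega,
      List.drop_append_of_le_length hc]
    simp
  have hrevS : S.reverse.filter (fun p => decide (p ≠ ".")) = [] := by
    rw [List.filter_eq_nil_iff]; intro a ha; simp only [List.mem_reverse] at ha; simpa using hS a ha
  have hf1 : ((M.drop c ++ "." :: S).reverse).filter (fun p => decide (p ≠ "."))
      = ((M.drop c).reverse).filter (fun p => decide (p ≠ ".")) := by
    rw [List.reverse_append, List.reverse_cons, List.filter_append, List.filter_append,
      List.filter_cons_of_neg (p := fun p => decide (p ≠ ".")) (by simp), hrevS]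
    simp
  have hf2 : ((M.drop c ++ b :: S).reverse).filter (fun p => decide (p ≠ "."))
      = b :: ((M.drop c).reverse).filter (fun p => decide (p ≠ ".")) := by
    rw [List.reverse_append, List.reverse_cons, List.filter_append, List.filter_append,
      List.filter_cons_of_pos (p := fun p => decide (p ≠ ".")) (by simp [hb]), hrevS]
    simp
  unfold move_numbers_alt
  simp only [hk1, hk2, hdrop1, hdrop2, hf1, hf2]
  rw [fill_skip C hC _ _ (c + 1), fill_skip C hC _ _ (c + 1)]
  rw [fill_step_nd b _ _ _ hb, fill_step_dot]
  congr 1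
  congr 1
  apply fill_congr
  · simp
  · rw [List.take_append_of_le_length hc, List.take_append_of_le_length hc]

-- decompositions
theorem ex_first_dot : ∀ (Q : List String), ¬ (∀ x ∈ Q, x ≠ ".") →
    ∃ A B, Q = A ++ "." :: B ∧ ∀ x ∈ A, x ≠ "." := by
  intro Q
  induction Q with
  | nil => intro h; exact absurd (by simp) h
  | cons x Q ih =>
    intro h
    by_cases hx : x = "."
    · exact ⟨[], Q, by simp [hx], by simp⟩
    · have hQ : ¬ ∀ y ∈ Q, y ≠ "." := by
        intro hall
        apply h
        intro y hy
        rcases List.mem_cons.mp hy with rfl | hy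
        · exact hx
        · exact hall y hy
      obtain ⟨A, B, hEq, hA⟩ := ih hQ
      refine ⟨x :: A, B, by simp [hEq], ?_⟩
      intro y hy
      rcases List.mem_cons.mp hy with rfl | hy
      · exact hx
      · exact hA y hy

theorem ex_last_nd : ∀ (B : List String), ¬ (∀ x ∈ B, x = ".") →
    ∃ M b D, B = M ++ b :: D ∧ b ≠ "." ∧ ∀ x ∈ D, x = "." := by
  intro B
  induction B with
  | nil => intro h; exact absurd (by simp) h
  | cons x B ih =>
    intro h
    by_cases hB : ∀ y ∈ B, y = "."
    · have hx : x ≠ "." := by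
        intro hx
        apply h
        intro y hy
        rcases List.mem_cons.mp hy with rfl | hy
        · exact hx
        · exact hB y hy
      exact ⟨[], x, B, by simp, hx, hB⟩
    · obtain ⟨M, b, D, hEq, hb, hD⟩ := ih hB
      exact ⟨x :: M, b, D, by simp [hEq], hb, hD⟩

-- main loop invariant
theorem loop_main : ∀ (n : Nat) (Q P S : List String), Q.length ≤ n →
    (∀ x ∈ P, x ≠ ".") → (∀ x ∈ S, x = ".") →
    move_numbers_loop (P ++ Q ++ S) (P.length : Int) ((P.length : Int) + Q.length - 1)
      = move_numbers_alt (P ++ Q ++ S) := by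
  intro n
  induction n using Nat.strong_induction_on with
  | _ n ih =>
  intro Q P S hn hP hS
  by_cases hQ : ∀ x ∈ Q, x ≠ "."
  · -- already compacted: the loop stops at once
    have hPQ : ∀ x ∈ P ++ Q, x ≠ "." := by
      intro x hx; rcases List.mem_append.mp hx with h | h
      exacts [hP x h, hQ x h]
    have hglp : get_left_pointer (P ++ Q ++ S) (P.length : Int) = ((P ++ Q).length : Int) := by
      rw [glp_skip Q hQ P S,
        show ((P.length : Int) + Q.length) = ((P ++ Q).length : Int) by simp]
      exact glp_at_allD (P ++ Q) S hS
    have hgrp : get_right_pointer (P ++ Q ++ S) ((P.length : Int) + Q.length - 1)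
        = ((P ++ Q).length : Int) - 1 := by
      rw [show ((P.length : Int) + Q.length - 1) = ((P ++ Q).length : Int) - 1 by simp]
      exact grp_nd_end (P ++ Q) S hPQ
    rw [loop_ret _ _ _ (by rw [hglp, hgrp]; omega)]
    exact (alt_sorted (P ++ Q) S hPQ hS).symm
  · obtain ⟨A, B, hQeq, hA⟩ := ex_first_dot Q hQ
    subst hQeq
    have hPA : ∀ x ∈ P ++ A, x ≠ "." := by
      intro x hx; rcases List.mem_append.mp hx with h | h
      exacts [hP x h, hA x h]
    by_cases hB : ∀ x ∈ B, x = "."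
    · -- everything after the first dot is a dot: the pointers cross, the loop stops
      have hcan : P ++ (A ++ "." :: B) ++ S = (P ++ A) ++ "." :: (B ++ S) := by simp
      have hSd : ∀ x ∈ "." :: (B ++ S), x = "." := by
        intro x hx; rcases List.mem_cons.mp hx with rfl | hx
        · rfl
        · rcases List.mem_append.mp hx with h | h
          exacts [hB x h, hS x h]
      have hglp : get_left_pointer ((P ++ A) ++ "." :: (B ++ S)) (P.length : Int)
          = ((P ++ A).length : Int) := by
        rw [show (P ++ A) ++ "." :: (B ++ S) = P ++ A ++ ("." :: (B ++ S)) by simp,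
          glp_skip A hA P ("." :: (B ++ S)),
          show ((P.length : Int) + A.length) = ((P ++ A).length : Int) by simp]
        exact glp_stop_dot (P ++ A) (B ++ S)
      have hgrp : get_right_pointer ((P ++ A) ++ "." :: (B ++ S))
          ((P.length : Int) + (A ++ "." :: B).length - 1) = ((P ++ A).length : Int) - 1 := by
        have h1 := grp_skip ("." :: B) (by intro x hx; rcases List.mem_cons.mp hx with rfl | hx; exacts [rfl, hB x hx])
          (P ++ A) S
        rw [show (P ++ A) ++ "." :: B ++ S = (P ++ A) ++ "." :: (B ++ S) by simp] at h1
        rw [show ((P.length : Int) + (A ++ "." :: B).length - 1)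
            = (((P ++ A).length : Int) + ("." :: B : List String).length - 1) by simp only [List.length_append, List.length_cons]; push_cast; omega,
          h1]
        exact grp_nd_end (P ++ A) ("." :: (B ++ S)) hPA
      rw [hcan, loop_ret _ _ _ (by rw [hglp, hgrp]; omega)]
      exact (alt_sorted (P ++ A) ("." :: (B ++ S)) hPA hSd).symm
    · -- a non-dot sits right of the first dot: one swap, then the induction hypothesis
      obtain ⟨M, b, D, hBeq, hb, hD⟩ := ex_last_nd B hB
      subst hBeq
      have hS2 : ∀ x ∈ "." :: (D ++ S), x = "." := by
        intro x hx; rcases List.mem_cons.mp hx with rfl | hx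
        · rfl
        · rcases List.mem_append.mp hx with h | h
          exacts [hD x h, hS x h]
      have hcan : P ++ (A ++ "." :: (M ++ b :: D)) ++ S
          = (P ++ A) ++ "." :: (M ++ b :: (D ++ S)) := by simp
      rw [hcan]
      have hglp : get_left_pointer ((P ++ A) ++ "." :: (M ++ b :: (D ++ S))) (P.length : Int)
          = ((P ++ A).length : Int) := by
        rw [show (P ++ A) ++ "." :: (M ++ b :: (D ++ S)) = P ++ A ++ ("." :: (M ++ b :: (D ++ S))) by simp,
          glp_skip A hA P ("." :: (M ++ b :: (D ++ S))),
          show ((P.length : Int) + A.length) = ((P ++ A).length : Int) by simp]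
        exact glp_stop_dot (P ++ A) (M ++ b :: (D ++ S))
      have hgrp : get_right_pointer ((P ++ A) ++ "." :: (M ++ b :: (D ++ S)))
          ((P.length : Int) + (A ++ "." :: (M ++ b :: D)).length - 1)
          = ((P ++ A).length : Int) + 1 + M.length := by
        have h1 := grp_skip D hD ((P ++ A) ++ "." :: M ++ [b]) S
        rw [show ((P ++ A) ++ "." :: M ++ [b]) ++ D ++ S = (P ++ A) ++ "." :: (M ++ b :: (D ++ S)) by simp] at h1
        have h2 := grp_stop ((P ++ A) ++ "." :: M) (D ++ S) b hb
        rw [show ((P ++ A) ++ "." :: M) ++ b :: (D ++ S) = (P ++ A) ++ "." :: (M ++ b :: (D ++ S)) by simp] at h2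
        rw [show ((P.length : Int) + (A ++ "." :: (M ++ b :: D)).length - 1)
            = ((((P ++ A) ++ "." :: M ++ [b]).length : Int) + (D.length : Int) - 1) by simp only [List.length_append, List.length_cons, List.length_nil]; push_cast; omega,
          h1,
          show ((((P ++ A) ++ "." :: M ++ [b]).length : Int) - 1) = ((((P ++ A) ++ "." :: M).length : Int)) by simp only [List.length_append, List.length_cons, List.length_nil]; push_cast; omega,
          h2]
        simp only [List.length_append, List.length_cons]; push_cast; omega
      rw [move_numbers_loop]
      rw [if_pos (by simp only [List.length_append, List.length_cons]; push_cast; omega)]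
      rw [hglp, hgrp]
      rw [if_neg (by omega)]
      rw [swap_eval (P ++ A) M (D ++ S) b]
      have hih := ih M.length (by simp only [List.length_append, List.length_cons] at hn ⊢; omega)
        M (P ++ A ++ [b]) ("." :: (D ++ S)) (le_refl _)
        (by intro x hx
            rcases List.mem_append.mp hx with h | h
            · exact hPA x h
            · simp only [List.mem_singleton] at h; subst h; exact hb)
        hS2
      rw [show (P ++ A ++ [b]) ++ M ++ ("." :: (D ++ S)) = (P ++ A) ++ b :: (M ++ "." :: (D ++ S)) by simp] at hih
      rw [show (((P ++ A ++ [b]).length : Int)) = (((P ++ A).length : Int) + 1) by simp only [List.length_append, List.length_cons, List.length_nil]; push_cast; omega] at hih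
      rw [show (((P ++ A).length : Int) + 1 + M.length - 1) = (((P ++ A).length : Int) + 1) + (M.length : Int) - 1 by ring]
      rw [hih]
      exact alt_swap (P ++ A) M (D ++ S) b hPA (fun x hx => hS2 x (List.mem_cons_of_mem _ hx)) hb

-- ===== VERDICT (by name: the statement is the Claim_ definition above) =====
theorem move_numbers_spec : Claim_equal_move_numbers := by
  intro parts _
  unfold Spec_move_numbers move_numbers
  have h := loop_main parts.length parts [] [] (le_refl _) (by simp) (by simp)
  simpa using h
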